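-- pv_equiv track=rewrite | github.com/Rubal0990/GFG-DSA | Convert an array to reduced form - GFG/convert-an-array-to-reduced-form.py | convert
-- ===== SOURCE A (Python) =====
-- def convert(arr, n):
-- 	a = []
-- 	for i in range(len(arr)):
-- 	    a.append((arr[i], i))
--
-- 	a.sort(key = lambda x:x[0])
-- 	for i in range(len(a)):
-- 	    ind = a[i][1]
-- 	    arr[ind] = i
--
-- 	return arr
-- ===== SOURCE B (Python) =====
-- def convert(arr, n):
--     first = {}
--     for k, v in enumerate(sorted(arr)):
--         if v not in first:
--             first[v] = k
--     seen = {}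
--     out = []
--     for v in arr:
--         c = seen.get(v, 0)
--         out.append(first[v] + c)
--         seen[v] = c + 1
--     arr[:] = out
--     return arr
-- ===== Notes on version B (the rewrite author's own statement) =====
-- stated objective: alternative
-- what changed: Instead of sorting (value,index) pairs and scattering ranks back through the stored indices, B sorts the plain values once, records each value's first position in sorted order in a dict, and assigns arr[i] = first[v] + running occurrence count of v, with no index pairs and no scatter pass.
import Mathlib
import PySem

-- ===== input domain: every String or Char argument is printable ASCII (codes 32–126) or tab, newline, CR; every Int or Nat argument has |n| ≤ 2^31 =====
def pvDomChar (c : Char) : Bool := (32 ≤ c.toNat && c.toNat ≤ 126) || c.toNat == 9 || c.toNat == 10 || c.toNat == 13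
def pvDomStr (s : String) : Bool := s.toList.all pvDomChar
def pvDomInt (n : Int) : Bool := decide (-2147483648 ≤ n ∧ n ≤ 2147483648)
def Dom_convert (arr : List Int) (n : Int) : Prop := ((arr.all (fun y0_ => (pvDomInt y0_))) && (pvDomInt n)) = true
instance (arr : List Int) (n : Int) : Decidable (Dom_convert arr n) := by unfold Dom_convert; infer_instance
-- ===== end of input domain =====

-- B replaces A's sort-of-(value,index)-pairs-then-scatter by: sort the plain values, record each
-- value's first sorted position in a dict, and emit first[v] + running occurrence count of v
-- (objective: alternative algorithm, same O(n log n) cost). Both A and B mutate arr in place in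
-- Python; the equivalence proved here is about the RETURN value (the two mutations coincide with it).


-- ===== PORT A =====
-- a = []; for i in range(len(arr)): a.append((arr[i], i)); a.sort(key=lambda x: x[0]);
-- for i in range(len(a)): ind = a[i][1]; arr[ind] = i; return arr
-- (pyGetD is exact here: every index read is in range; pySetD is exact: every ind is in range)
def convert (arr : List Int) (n : Int) : List Int :=
  let a : List (Int × Int) :=
    (PySem.List.pyRange 0 (PySem.List.len arr)).foldl
      (fun acc i => acc ++ [(PySem.List.pyGetD arr i 0, i)]) []
  let a := PySem.List.sorted a (fun x => x.1)
  (PySem.List.pyRange 0 (PySem.List.len a)).foldl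
    (fun b i => PySem.List.pySetD b (PySem.List.pyGetD a i (0, 0)).2 i) arr

-- ===== PORT B =====
-- sort the values; first[v] := first position of v in sorted order; then one pass over arr
-- emitting first[v] + (occurrences of v seen so far).  (first[v] is exact via get?/getD: every
-- v ∈ arr occurs in sorted(arr), so the key is always present)
def convert_alt (arr : List Int) (n : Int) : List Int :=
  let sortedArr := PySem.List.sorted arr (fun x => x)
  let first : PySem.Dict Int Int :=
    (PySem.List.enumerate sortedArr 0).foldl
      (fun d p => if d.contains p.2 then d else d.insert p.2 p.1) PySem.Dict.empty
  let res := arr.foldl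
      (fun (st : List Int × PySem.Dict Int Int) v =>
        let c := st.2.getD v 0
        (st.1 ++ [(first.get? v).getD 0 + c], st.2.insert v (c + 1)))
      ([], PySem.Dict.empty)
  res.1

-- ===== PRECONDITION & SPEC =====
def Spec_convert (arr : List Int) (n : Int) (out : List Int) : Prop := out = convert_alt arr n
instance (arr : List Int) (n : Int) (out : List Int) : Decidable (Spec_convert arr n out) := by unfold Spec_convert; infer_instance

-- ===== CLAIM (what is proved, stated in full; the proofs are below) =====
def Claim_equal_convert : Prop := ∀ (arr : List Int) (n : Int), Dom_convert arr n → Spec_convert arr n (convert arr n)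

-- ===== LEMMAS AND PROOFS =====

-- The common rank value: rank of position j in arr = #(values < arr[j]) + #(copies of arr[j] before j).
def rankAt (arr : List Int) (j : Nat) : Int :=
  (arr.countP (fun w => decide (w < arr.getD j 0)) : Int) + (List.count (arr.getD j 0) (arr.take j) : Int)

-- A position-split counting helper: if everything strictly before index k satisfies p and nothing
-- from k on does, then countP p = k.
theorem countP_split {α : Type} (s : List α) (p : α → Bool) (k : Nat) (hk : k ≤ s.length)
    (h1 : ∀ j (hj : j < s.length), j < k → p s[j] = true)
    (h2 : ∀ j (hj : j < s.length), k ≤ j → p s[j] = false) :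
    s.countP p = k := by
  conv_lhs => rw [← List.take_append_drop k s]
  rw [List.countP_append]
  have ht : (s.take k).countP p = (s.take k).length := by
    rw [List.countP_eq_length]
    intro a ha
    rw [List.mem_take_iff_getElem] at ha
    obtain ⟨j, hm, rfl⟩ := ha
    exact h1 j (by omega) (by omega)
  have hd : (s.drop k).countP p = 0 := by
    rw [List.countP_eq_zero]
    intro a ha
    rw [List.mem_drop_iff_getElem] at ha
    obtain ⟨j, hm, rfl⟩ := ha
    simp [h2 (k + j) (by omega) (by omega)]
  rw [ht, hd, List.length_take]
  omega

-- ---- A side ----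

-- the pair list A builds
def pairsOf (arr : List Int) : List (Int × Int) :=
  (PySem.List.enumerate arr 0).map (fun p => (p.2, p.1))

theorem length_pairsOf (arr : List Int) : (pairsOf arr).length = arr.length := by
  simp [pairsOf, PySem.List.length_enumerate]

theorem getElem_pairsOf (arr : List Int) (k : Nat) (h : k < (pairsOf arr).length) :
    (pairsOf arr)[k] = (arr[k]'(by simpa [length_pairsOf] using h), (k : Int)) := by
  simp [pairsOf, PySem.List.getElem_enumerate]

theorem pairs_build (arr : List Int) :
    (PySem.List.pyRange 0 (PySem.List.len arr)).foldl
      (fun acc i => acc ++ [(PySem.List.pyGetD arr i 0, i)]) [] = pairsOf arr := by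
  rw [PySem.List.foldl_append_singleton_eq_map, List.nil_append]
  apply List.ext_getElem
  · simp [PySem.List.length_pyRange_one, length_pairsOf, PySem.List.len]
  · intro k h1 h2
    rw [List.getElem_map, PySem.List.getElem_pyRange_one, getElem_pairsOf]
    have hk : k < arr.length := by simpa [length_pairsOf] using h2
    have : (0 : Int) + (k : Nat) = ((k : Nat) : Int) := by omega
    rw [this, PySem.List.pyGetD_natCast, List.getD_eq_getElem _ _ hk]

theorem convert_eq_scatter (arr : List Int) (n : Int) :
    convert arr n =
      (PySem.List.pyRange 0 (PySem.List.len (PySem.List.sorted (pairsOf arr) (fun x => x.1)))).foldl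
        (fun b i => PySem.List.pySetD b
          (PySem.List.pyGetD (PySem.List.sorted (pairsOf arr) (fun x => x.1)) i (0, 0)).2 i) arr := by
  simp only [convert, pairs_build]

-- stability: sorting the pairs by fst equals sorting them by the injective combined key
def keyN (N : Int) (p : Int × Int) : Int := p.1 * N + p.2

-- every element of pairsOf arr is (arr[i], i)
theorem mem_pairsOf (arr : List Int) (q : Int × Int) (hq : q ∈ pairsOf arr) :
    ∃ i : Nat, ∃ h : i < arr.length, q = (arr[i], (i : Int)) := by
  simp only [pairsOf, List.mem_map] at hq
  obtain ⟨p, hp, rfl⟩ := hq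
  rw [PySem.List.mem_enumerate_iff] at hp
  obtain ⟨k, h, rfl⟩ := hp
  exact ⟨k, h, by simp⟩

theorem keyN_lt_iff (N : Int) (p q : Int × Int) (hp : 0 ≤ p.2 ∧ p.2 < N) (hq : 0 ≤ q.2 ∧ q.2 < N) :
    keyN N p < keyN N q ↔ (p.1 < q.1 ∨ (p.1 = q.1 ∧ p.2 < q.2)) := by
  unfold keyN
  constructor
  · intro h
    rcases lt_trichotomy p.1 q.1 with h1 | h1 | h1
    · exact Or.inl h1
    · exact Or.inr ⟨h1, by rw [h1] at h; omega⟩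
    · exfalso
      have : (q.1 + 1) * N ≤ p.1 * N := mul_le_mul_of_nonneg_right (by omega) (by omega)
      nlinarith
  · intro h
    rcases h with h1 | ⟨h1, h2⟩
    · have : (p.1 + 1) * N ≤ q.1 * N := mul_le_mul_of_nonneg_right (by omega) (by omega)
      nlinarith
    · rw [h1]; omega

theorem insertBy_congr_of_snd_lt (N : Int) (x : Int × Int) (acc : List (Int × Int))
    (hxN : 0 ≤ x.2 ∧ x.2 < N) (haccN : ∀ y ∈ acc, 0 ≤ y.2 ∧ y.2 < N)
    (hlt : ∀ y ∈ acc, y.2 < x.2) :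
    PySem.List.insertBy (fun a b => decide (a.1 < b.1)) x acc
      = PySem.List.insertBy (fun a b => decide (keyN N a < keyN N b)) x acc := by
  induction acc with
  | nil => rfl
  | cons y ys ih =>
      have hy := haccN y (by simp)
      have hylt := hlt y (by simp)
      have hiff : (x.1 < y.1) ↔ (keyN N x < keyN N y) := by
        rw [keyN_lt_iff N x y hxN hy]
        omega
      simp only [PySem.List.insertBy]
      by_cases h : x.1 < y.1
      · rw [if_pos (by simpa using h), if_pos (by simpa using hiff.mp h)]
      · rw [if_neg (by simpa using h),
          if_neg (by simpa using (fun hk => h (hiff.mpr hk))),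
          ih (fun z hz => haccN z (by simp [hz])) (fun z hz => hlt z (by simp [hz]))]

theorem foldl_insertBy_congr (N : Int) (l : List (Int × Int)) : ∀ (acc : List (Int × Int)),
    (∀ y ∈ acc, 0 ≤ y.2 ∧ y.2 < N) → (∀ x ∈ l, 0 ≤ x.2 ∧ x.2 < N) →
    (∀ y ∈ acc, ∀ x ∈ l, y.2 < x.2) → l.Pairwise (fun a b => a.2 < b.2) →
    l.foldl (fun acc x => PySem.List.insertBy (fun a b => decide (a.1 < b.1)) x acc) acc
      = l.foldl (fun acc x => PySem.List.insertBy (fun a b => decide (keyN N a < keyN N b)) x acc) acc := by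
  induction l with
  | nil => intro acc _ _ _ _; rfl
  | cons x t ih =>
      intro acc haccN hlN hcross hpw
      have hxN := hlN x (by simp)
      have hx : ∀ y ∈ acc, y.2 < x.2 := fun y hy => hcross y hy x (by simp)
      have hstep := insertBy_congr_of_snd_lt N x acc hxN haccN hx
      simp only [List.foldl_cons]
      rw [hstep]
      have hmem : ∀ z ∈ PySem.List.insertBy (fun a b => decide (keyN N a < keyN N b)) x acc,
          z = x ∨ z ∈ acc := by
        intro z hz
        exact (PySem.List.mem_insertBy _ x z acc).mp hz
      rw [List.pairwise_cons] at hpw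
      exact ih _
        (fun y hy => (hmem y hy).elim (fun h => h ▸ hxN) (fun h => haccN y h))
        (fun z hz => hlN z (by simp [hz]))
        (fun y hy z hz => (hmem y hy).elim (fun h => h ▸ hpw.1 z hz)
          (fun h => lt_trans (hx y h) (hpw.1 z hz)))
        hpw.2

theorem pairsOf_snd_bounds (arr : List Int) (q : Int × Int) (hq : q ∈ pairsOf arr) :
    0 ≤ q.2 ∧ q.2 < (arr.length : Int) := by
  obtain ⟨i, h, rfl⟩ := mem_pairsOf arr q hq
  simp; omega

theorem pairsOf_pairwise_snd (arr : List Int) :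
    (pairsOf arr).Pairwise (fun a b => a.2 < b.2) := by
  unfold pairsOf
  apply List.Pairwise.map
  · intro a b (h : a.1 < b.1)
    simpa using h
  · exact PySem.List.pairwise_lt_enumerate arr 0

theorem sorted_fst_eq_sorted_keyN (arr : List Int) :
    PySem.List.sorted (pairsOf arr) (fun x => x.1)
      = PySem.List.sorted (pairsOf arr) (keyN (arr.length : Int)) := by
  rw [PySem.List.sorted_eq_foldl_insertBy, PySem.List.sorted_eq_foldl_insertBy]
  exact foldl_insertBy_congr (arr.length : Int) (pairsOf arr) []
    (by simp) (pairsOf_snd_bounds arr) (by simp) (pairsOf_pairwise_snd arr)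

theorem keyN_inj (N : Int) (p q : Int × Int) (hp : 0 ≤ p.2 ∧ p.2 < N) (hq : 0 ≤ q.2 ∧ q.2 < N)
    (h : keyN N p = keyN N q) : p = q := by
  have h1 : p.1 = q.1 := by
    rcases lt_trichotomy p.1 q.1 with hc | hc | hc
    · have := (keyN_lt_iff N p q hp hq).mpr (Or.inl hc); omega
    · exact hc
    · have := (keyN_lt_iff N q p hq hp).mpr (Or.inl hc); omega
  have h2 : p.2 = q.2 := by
    unfold keyN at h; rw [h1] at h; omega
  exact Prod.ext h1 h2

theorem enum_count (V : Int) (xs : List Int) : ∀ (s T : Int),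
    (PySem.List.enumerate xs s).countP (fun p => decide (p.2 < V ∨ (p.2 = V ∧ p.1 < T)))
      = xs.countP (fun w => decide (w < V)) + List.count V (xs.take (T - s).toNat) := by
  induction xs with
  | nil => intro s T; simp [PySem.List.enumerate_nil]
  | cons x t ih =>
      intro s T
      rw [PySem.List.enumerate_cons, List.countP_cons, List.countP_cons]
      by_cases hsT : s < T
      · have h1 : (T - s).toNat = (T - (s + 1)).toNat + 1 := by omega
        rw [h1, List.take_succ_cons, List.count_cons, ih (s + 1) T]
        by_cases hxV : x < V <;> by_cases hxE : x = V <;>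
          simp [hxV, hxE, hsT] <;> omega
      · have h0 : (T - s).toNat = 0 := by omega
        have h0' : (T - (s + 1)).toNat = 0 := by omega
        rw [h0, ih (s + 1) T, h0']
        by_cases hxV : x < V <;> by_cases hxE : x = V <;>
          simp [hxV, hxE, hsT]

-- position of an element in the keyN-sorted list = rank
theorem pos_in_sorted (arr : List Int) (k : Nat)
    (hk : k < (PySem.List.sorted (pairsOf arr) (fun x => x.1)).length) :
    (k : Int) = rankAt arr ((PySem.List.sorted (pairsOf arr) (fun x => x.1))[k].2).toNat := by
  set N : Int := (arr.length : Int) with hN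
  set s := PySem.List.sorted (pairsOf arr) (fun x => x.1) with hs
  have hsk : s = PySem.List.sorted (pairsOf arr) (keyN N) := sorted_fst_eq_sorted_keyN arr
  have hperm : s.Perm (pairsOf arr) := by
    rw [hsk]; exact PySem.List.sorted_perm (pairsOf arr) (keyN N) false
  have hmemS : ∀ q ∈ s, ∃ i : Nat, ∃ h : i < arr.length, q = (arr[i], (i : Int)) := by
    intro q hq
    exact mem_pairsOf arr q (hperm.mem_iff.mp hq)
  have hboundS : ∀ q ∈ s, 0 ≤ q.2 ∧ q.2 < N := by
    intro q hq
    exact pairsOf_snd_bounds arr q (hperm.mem_iff.mp hq)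
  have hnodupP : (pairsOf arr).Nodup := (pairsOf_pairwise_snd arr).imp (fun h => by
    intro he; rw [he] at h; exact lt_irrefl _ h)
  have hnodupS : s.Nodup := hperm.nodup_iff.mpr hnodupP
  have hmono : ∀ (i j : Nat) (hij : i ≤ j) (hj : j < s.length),
      keyN N (s[i]'(by omega)) ≤ keyN N s[j] := by
    intro i j hij hj
    have hj' : j < (PySem.List.sorted (pairsOf arr) (keyN N)).length := by
      rw [← hsk]; exact hj
    have := PySem.List.key_sorted_getElem_mono (pairsOf arr) (keyN N) hij hj'
    simp only [← hsk] at this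
    exact this
  have hstrict : ∀ (i j : Nat) (hi : i < j) (hj : j < s.length),
      keyN N (s[i]'(by omega)) < keyN N s[j] := by
    intro i j hij hj
    have hle := hmono i j (by omega) hj
    have hne : s[i]'(by omega) ≠ s[j] := by
      intro he
      have := List.Nodup.getElem_inj_iff hnodupS |>.mp he
      omega
    rcases lt_or_eq_of_le hle with h | h
    · exact h
    · exact absurd (keyN_inj N _ _ (hboundS _ (List.getElem_mem _)) (hboundS _ (List.getElem_mem _)) h) hne
  -- k is the number of elements with smaller key
  have hcount : s.countP (fun q => decide (keyN N q < keyN N s[k])) = k := by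
    apply countP_split s _ k (by omega)
    · intro j hj hjk
      simpa using hstrict j k hjk hk
    · intro j hj hkj
      have := hmono k j hkj hj
      simpa using (by omega : ¬ (keyN N s[j] < keyN N s[k]))
  obtain ⟨i0, hi0, hski0⟩ := hmemS s[k] (List.getElem_mem hk)
  have hsnd : (s[k].2).toNat = i0 := by rw [hski0]; simp
  rw [hsnd]
  have hb0 : 0 ≤ ((i0 : Int)) ∧ ((i0 : Int)) < N := ⟨by omega, by rw [hN]; exact_mod_cast hi0⟩
  -- translate the key predicate into the rank predicate, counted over pairsOf
  have hcount2 : s.countP (fun q => decide (keyN N q < keyN N s[k]))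
      = (pairsOf arr).countP (fun q => decide (q.1 < arr[i0] ∨ (q.1 = arr[i0] ∧ q.2 < (i0 : Int)))) := by
    rw [hperm.countP_eq]
    apply List.countP_congr
    intro q hq
    have hbq := pairsOf_snd_bounds arr q hq
    rw [hski0]
    simp only [decide_eq_true_eq]
    exact keyN_lt_iff N q (arr[i0], (i0 : Int)) hbq hb0
  have hcount3 : (pairsOf arr).countP (fun q => decide (q.1 < arr[i0] ∨ (q.1 = arr[i0] ∧ q.2 < (i0 : Int))))
      = arr.countP (fun w => decide (w < arr[i0])) + List.count arr[i0] (arr.take i0) := by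
    unfold pairsOf
    rw [List.countP_map]
    have := enum_count arr[i0] arr 0 (i0 : Int)
    simp only [sub_zero, Int.toNat_natCast] at this
    rw [← this]
    rfl
  rw [rankAt, List.getD_eq_getElem arr 0 hi0]
  rw [hcount2, hcount3] at hcount
  omega

theorem scatter_spec (s : List (Int × Int)) (arr : List Int)
    (hbound : ∀ q ∈ s, 0 ≤ q.2 ∧ q.2 < (arr.length : Int))
    (hnodup : (s.map (·.2)).Nodup) :
    ∀ (m : Nat), m ≤ s.length →
      ((PySem.List.pyRange 0 (m : Int)).foldl
        (fun b i => PySem.List.pySetD b (PySem.List.pyGetD s i (0, 0)).2 i) arr).length = arr.length ∧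
      ∀ j (hj : j < arr.length),
        ((PySem.List.pyRange 0 (m : Int)).foldl
          (fun b i => PySem.List.pySetD b (PySem.List.pyGetD s i (0, 0)).2 i) arr).getD j 0
        = match PySem.List.index? ((s.take m).map (·.2)) ((j : Nat) : Int) with
          | some i => (i : Int)
          | none => arr.getD j 0 := by
  intro m
  induction m with
  | zero =>
      intro _
      rw [show ((0 : Nat) : Int) = 0 by rfl, PySem.List.pyRange_one_eq_nil (by omega)]
      simp [PySem.List.index?]
  | succ m ih =>
      intro hm
      have hms : m < s.length := by omega
      obtain ⟨ihlen, ihget⟩ := ih (by omega)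
      have hcast : ((m + 1 : Nat) : Int) = (m : Int) + 1 := by push_cast; ring
      rw [hcast, PySem.List.pyRange_one_succ_right (by omega), List.foldl_append]
      simp only [List.foldl_cons, List.foldl_nil]
      have hgd : PySem.List.pyGetD s ((m : Nat) : Int) (0, 0) = s[m] := by
        rw [PySem.List.pyGetD_natCast, List.getD_eq_getElem _ _ hms]
      rw [hgd]
      have hb := hbound s[m] (List.getElem_mem hms)
      set Fm := (PySem.List.pyRange 0 (m : Int)).foldl
        (fun b i => PySem.List.pySetD b (PySem.List.pyGetD s i (0, 0)).2 i) arr with hFm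
      set t : Nat := (s[m].2).toNat with ht
      have htlen : t < arr.length := by omega
      have htc : ((t : Nat) : Int) = s[m].2 := by omega
      rw [PySem.List.pySetD_of_nonneg _ _ hb.1]
      have hlen2 : (Fm.set t ((m : Nat) : Int)).length = arr.length := by
        rw [List.length_set, ihlen]
      refine ⟨hlen2, ?_⟩
      intro j hj
      -- the processed prefix grows by s[m]
      have htake : (s.take (m + 1)).map (·.2) = (s.take m).map (·.2) ++ [s[m].2] := by
        rw [List.take_succ, List.getElem?_eq_getElem hms]
        simp only [Option.toList_some, List.map_append, List.map_cons, List.map_nil]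
      have hnotmem : s[m].2 ∉ (s.take m).map (·.2) := by
        intro hmem
        rw [List.map_take] at hmem
        obtain ⟨i, hlt, hival⟩ := List.mem_take_iff_getElem.mp hmem
        have hieq : (s.map (·.2))[i]'(by simp; omega) = (s.map (·.2))[m]'(by simp; omega) := by
          rw [hival, List.getElem_map]
        have := (List.Nodup.getElem_inj_iff hnodup).mp hieq
        omega
      rw [htake]
      rw [List.getD_eq_getElem _ _ (by omega : j < (Fm.set t ((m : Nat) : Int)).length)]
      by_cases hjt : j = t
      · subst hjt
        rw [List.getElem_set]
        rw [if_pos rfl]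
        rw [htc, PySem.List.index?_append_singleton_self _ _ hnotmem]
        simp [List.length_take]
        omega
      · have hjne : ((j : Nat) : Int) ≠ s[m].2 := by omega
        rw [List.getElem_set, if_neg (fun h => hjt h.symm)]
        have hFmj : Fm[j]'(by omega) = Fm.getD j 0 := by
          rw [List.getD_eq_getElem _ _ (by omega : j < Fm.length)]
        rw [hFmj, ihget j hj]
        by_cases hmem : ((j : Nat) : Int) ∈ (s.take m).map (·.2)
        · rw [PySem.List.index?_append_of_mem [s[m].2] hmem]
        · have hnone1 : PySem.List.index? ((s.take m).map (·.2)) ((j : Nat) : Int) = none := by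
            rw [PySem.List.index?_eq_none_iff]; exact hmem
          have hnone2 : PySem.List.index? ((s.take m).map (·.2) ++ [s[m].2]) ((j : Nat) : Int) = none := by
            rw [PySem.List.index?_eq_none_iff]
            intro hc
            rcases List.mem_append.mp hc with hc | hc
            · exact hmem hc
            · simp at hc; exact hjne hc
          rw [hnone1, hnone2]

theorem convert_getElem (arr : List Int) (n : Int) :
    (convert arr n).length = arr.length ∧
    ∀ j (hj : j < arr.length), (convert arr n).getD j 0 = rankAt arr j := by
  rw [convert_eq_scatter]
  set s := PySem.List.sorted (pairsOf arr) (fun x => x.1) with hs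
  have hperm : s.Perm (pairsOf arr) := PySem.List.sorted_perm (pairsOf arr) (fun x => x.1) false
  have hbound : ∀ q ∈ s, 0 ≤ q.2 ∧ q.2 < (arr.length : Int) := by
    intro q hq; exact pairsOf_snd_bounds arr q (hperm.mem_iff.mp hq)
  have hsndperm : (s.map (·.2)).Perm (PySem.List.pyRange 0 (arr.length : Int)) := by
    have h1 : (s.map (·.2)).Perm ((pairsOf arr).map (·.2)) := hperm.map _
    have h2 : (pairsOf arr).map (·.2) = PySem.List.pyRange 0 (arr.length : Int) := by
      unfold pairsOf
      rw [List.map_map]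
      have : ((fun q : Int × Int => q.2) ∘ (fun p : Int × Int => (p.2, p.1))) = (fun p : Int × Int => p.1) := rfl
      rw [this]
      have := PySem.List.map_fst_enumerate arr (0 : Int)
      simpa using this
    rw [h2] at h1; exact h1
  have hnodup : (s.map (·.2)).Nodup :=
    hsndperm.nodup_iff.mpr (PySem.List.nodup_pyRange_one 0 (arr.length : Int))
  have hslen : s.length = arr.length := by
    have := hperm.length_eq; rw [length_pairsOf] at this; exact this
  have hlen_rw : PySem.List.len s = ((s.length : Nat) : Int) := by simp [PySem.List.len]
  rw [hlen_rw]
  obtain ⟨hlen, hget⟩ := scatter_spec s arr hbound hnodup s.length (le_refl _)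
  refine ⟨hlen, ?_⟩
  intro j hj
  rw [hget j hj, List.take_length]
  have hjmem : ((j : Nat) : Int) ∈ s.map (·.2) := by
    rw [hsndperm.mem_iff, PySem.List.mem_pyRange_one]
    omega
  obtain ⟨i, hidx⟩ := Option.isSome_iff_exists.mp ((PySem.List.index?_isSome_iff _ _).mpr hjmem)
  rw [hidx]
  obtain ⟨hi, hival, _⟩ := PySem.List.getElem_of_index?_eq_some hidx
  rw [List.getElem_map] at hival
  have hi' : i < s.length := by simpa using hi
  have hrank := pos_in_sorted arr i (by rw [hs] at hi'; exact hi')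
  simp only [← hs] at hrank
  rw [hival] at hrank
  simpa using hrank

-- ---- B side ----

-- the per-element emission of B's main loop, as a recursion
def ranksFrom (g : Int → Int) (seen : PySem.Dict Int Int) : List Int → List Int
  | [] => []
  | v :: t => (g v + seen.getD v 0) :: ranksFrom g (seen.insert v (seen.getD v 0 + 1)) t

theorem foldl_step_fst (g : Int → Int) (l : List Int) : ∀ (out : List Int) (seen : PySem.Dict Int Int),
    (l.foldl
      (fun (st : List Int × PySem.Dict Int Int) v =>
        (st.1 ++ [g v + st.2.getD v 0], st.2.insert v (st.2.getD v 0 + 1)))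
      (out, seen)).1 = out ++ ranksFrom g seen l := by
  induction l with
  | nil => intro out seen; simp [ranksFrom]
  | cons v t ih =>
      intro out seen
      simp only [List.foldl_cons, ranksFrom, ih]
      simp

theorem convert_alt_eq_ranksFrom (arr : List Int) (n : Int) :
    convert_alt arr n =
      ranksFrom
        (fun v => (((PySem.List.enumerate (PySem.List.sorted arr (fun x => x)) 0).foldl
            (fun d p => if d.contains p.2 then d else d.insert p.2 p.1) PySem.Dict.empty).get? v).getD 0)
        PySem.Dict.empty arr := by
  simp only [convert_alt]
  rw [foldl_step_fst (fun v => (((PySem.List.enumerate (PySem.List.sorted arr (fun x => x)) 0).foldl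
            (fun d p => if d.contains p.2 then d else d.insert p.2 p.1) PySem.Dict.empty).get? v).getD 0) arr [] PySem.Dict.empty]
  simp

theorem ranksFrom_getElem (g : Int → Int) (seen : PySem.Dict Int Int) (l : List Int) :
    (ranksFrom g seen l).length = l.length ∧
    ∀ j (hj : j < l.length),
      (ranksFrom g seen l).getD j 0 = g l[j] + seen.getD l[j] 0 + (List.count l[j] (l.take j) : Int) := by
  induction l generalizing seen with
  | nil => simp [ranksFrom]
  | cons v t ih =>
      refine ⟨by simp [ranksFrom, (ih (seen.insert v (seen.getD v 0 + 1))).1], ?_⟩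
      intro j hj
      match j with
      | 0 => simp [ranksFrom]
      | Nat.succ j =>
          have hj' : j < t.length := by simpa using hj
          have := (ih (seen.insert v (seen.getD v 0 + 1))).2 j hj'
          simp only [ranksFrom, List.getD_cons_succ, this, List.getElem_cons_succ, List.take_succ_cons,
            List.count_cons, PySem.Dict.getD_insert]
          by_cases hv : t[j] = v
          · simp only [hv, beq_self_eq_true, if_true]
            push_cast; ring
          · rw [if_neg hv, if_neg (by simpa using Ne.symm hv)]
            push_cast; ring

theorem firstFold_get? (l : List (Int × Int)) : ∀ (d : PySem.Dict Int Int) (v : Int),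
    ((l.foldl (fun d p => if d.contains p.2 then d else d.insert p.2 p.1) d).get? v)
      = (d.get? v).or ((l.find? (fun p => p.2 == v)).map (·.1)) := by
  induction l with
  | nil => intro d v; simp
  | cons p t ih =>
      intro d v
      simp only [List.foldl_cons]
      by_cases hv : p.2 = v
      · have hvv : v = p.2 := hv.symm
        rw [List.find?_cons_of_pos (p := fun q : Int × Int => q.2 == v) (a := p) (l := t) (by simpa using hv)]
        by_cases hc : d.contains p.2 = true
        · have : (d.get? v).isSome := by
            rw [← hvv] at hc; rw [PySem.Dict.contains_eq_isSome_get?] at hc; exact hc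
          obtain ⟨w, hw⟩ := Option.isSome_iff_exists.mp this
          rw [if_pos hc, ih, hw]; simp
        · have hnone : d.get? v = none := by
            rw [← hvv] at hc; rw [PySem.Dict.contains_eq_isSome_get?] at hc
            simpa using hc
          rw [if_neg hc, ih, PySem.Dict.get?_insert, if_pos hvv, hnone]
          simp
      · rw [List.find?_cons_of_neg (p := fun q : Int × Int => q.2 == v) (a := p) (l := t) (by simpa using hv)]
        by_cases hc : d.contains p.2 = true
        · rw [if_pos hc, ih]
        · rw [if_neg hc, ih, PySem.Dict.get?_insert,
            if_neg (fun h => hv h.symm)]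

theorem find?_enumerate (xs : List Int) : ∀ (s v : Int),
    (PySem.List.enumerate xs s).find? (fun p => p.2 == v)
      = Option.map (fun k : Nat => ((s + (k : Int), v) : Int × Int)) (PySem.List.index? xs v) := by
  induction xs with
  | nil => intro s v; simp [PySem.List.enumerate_nil, PySem.List.index?]
  | cons x t ih =>
      intro s v
      rw [PySem.List.enumerate_cons]
      by_cases hv : x = v
      · subst hv
        rw [PySem.List.index?_cons_self, List.find?_cons_of_pos (by simp)]
        simp
      · rw [List.find?_cons_of_neg (by simpa using hv), ih (s + 1) v,
          PySem.List.index?_cons_of_ne t hv]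
        cases PySem.List.index? t v with
        | none => simp
        | some k => simp [Prod.ext_iff]; ring

-- the first-occurrence dict lookup
theorem first_get? (sortedArr : List Int) (v : Int) :
    ((PySem.List.enumerate sortedArr 0).foldl
        (fun d p => if d.contains p.2 then d else d.insert p.2 p.1) PySem.Dict.empty).get? v
      = (PySem.List.index? sortedArr v).map (fun k => (k : Int)) := by
  rw [firstFold_get?, find?_enumerate]
  rw [PySem.Dict.get?_empty, Option.none_or, Option.map_map]
  cases PySem.List.index? sortedArr v with
  | none => simp
  | some k => simp

-- countP is at least j+1 when everything up to index j satisfies p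
theorem countP_ge_of_prefix {α : Type} (s : List α) (p : α → Bool) (j : Nat) (hj : j < s.length)
    (h : ∀ i (hi : i < s.length), i ≤ j → p s[i] = true) : j + 1 ≤ s.countP p := by
  have hsplit : s.countP p = (s.take (j+1)).countP p + (s.drop (j+1)).countP p := by
    conv_lhs => rw [← List.take_append_drop (j+1) s]
    rw [List.countP_append]
  have ht : (s.take (j+1)).countP p = (s.take (j+1)).length := by
    rw [List.countP_eq_length]
    intro a ha
    rw [List.mem_take_iff_getElem] at ha
    obtain ⟨i, hm, rfl⟩ := ha
    exact h i (by omega) (by omega)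
  rw [hsplit, ht, List.length_take]
  omega

-- countP is at most j when nothing from index j on satisfies p
theorem countP_le_of_suffix {α : Type} (s : List α) (p : α → Bool) (j : Nat)
    (h : ∀ i (hi : i < s.length), j ≤ i → p s[i] = false) : s.countP p ≤ j := by
  have hsplit : s.countP p = (s.take j).countP p + (s.drop j).countP p := by
    conv_lhs => rw [← List.take_append_drop j s]
    rw [List.countP_append]
  have hd : (s.drop j).countP p = 0 := by
    rw [List.countP_eq_zero]
    intro a ha
    rw [List.mem_drop_iff_getElem] at ha
    obtain ⟨i, hm, rfl⟩ := ha
    simp [h (j + i) (by omega) (by omega)]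
  have ht : (s.take j).countP p ≤ j := by
    calc (s.take j).countP p ≤ (s.take j).length := List.countP_le_length
    _ ≤ j := by rw [List.length_take]; omega
  omega

-- first index of v in the sorted list = number of values < v
theorem index?_sorted (arr : List Int) (v : Int) (hv : v ∈ arr) :
    PySem.List.index? (PySem.List.sorted arr (fun x => x)) v
      = some (arr.countP (fun w => decide (w < v))) := by
  set sa := PySem.List.sorted arr (fun x => x) with hsa
  set p : Int → Bool := fun w => decide (w < v) with hp
  have hperm : sa.Perm arr := PySem.List.sorted_perm arr (fun x => x) false
  have hc : sa.countP p = arr.countP p := hperm.countP_eq p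
  set c := arr.countP p with hcdef
  have hmono : ∀ (i j : Nat) (hij : i ≤ j) (hjl : j < sa.length), sa[i]'(by omega) ≤ sa[j] := by
    intro i j hij hjl
    exact PySem.List.key_sorted_getElem_mono arr (fun x => x) hij hjl
  have hvsa : v ∈ sa := (PySem.List.mem_sorted arr (fun x => x) false v).mpr hv
  obtain ⟨k, hk, hkv⟩ := List.mem_iff_getElem.mp hvsa
  have hclen : c < sa.length := by
    by_contra hcl
    have h1 : sa.length ≤ c := by omega
    have h2 : sa.countP p ≤ sa.length := List.countP_le_length
    have h3 : sa.countP p = sa.length := by omega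
    rw [List.countP_eq_length] at h3
    have := h3 v hvsa
    simp [hp] at this
  have hge : ∀ j (hj : j < sa.length), c ≤ j → p sa[j] = false := by
    intro j hj hcj
    by_contra hcontra
    have hjv : p sa[j] = true := by
      cases hb : p sa[j] with
      | false => exact absurd hb hcontra
      | true => rfl
    have hall : ∀ i (hi : i < sa.length), i ≤ j → p sa[i] = true := by
      intro i hi hij
      have := hmono i j hij hj
      simp only [hp, decide_eq_true_eq] at hjv ⊢
      omega
    have := countP_ge_of_prefix sa p j hj hall
    omega
  have hlt : ∀ j (hj : j < sa.length), j < c → p sa[j] = true := by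
    intro j hj hjc
    by_contra hcontra
    have hjv : ¬ (sa[j] < v) := by
      cases hb : p sa[j] with
      | true => exact absurd hb hcontra
      | false => simpa [hp] using hb
    have hsuf : ∀ i (hi : i < sa.length), j ≤ i → p sa[i] = false := by
      intro i hi hji
      have := hmono j i hji hi
      simp only [hp, decide_eq_false_iff_not]
      omega
    have := countP_le_of_suffix sa p j hsuf
    omega
  have hsac : sa[c] = v := by
    have h1 : ¬ (sa[c] < v) := by
      have := hge c hclen (le_refl c)
      simpa [hp] using this
    have hkc : c ≤ k := by
      by_contra hck
      have := hlt k hk (by omega)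
      simp [hp, hkv] at this
    have h2 : sa[c] ≤ v := hkv ▸ hmono c k hkc hk
    omega
  rw [PySem.List.index?_eq_some_iff]
  refine ⟨sa.take c, sa.drop (c + 1), ?_, by rw [List.length_take]; omega, ?_⟩
  · conv_lhs => rw [← List.take_append_drop c sa]
    rw [List.drop_eq_getElem_cons hclen, hsac]
  · intro hmem
    rw [List.mem_take_iff_getElem] at hmem
    obtain ⟨j, hm, hjv⟩ := hmem
    have := hlt j (by omega) (by omega)
    rw [hjv] at this
    simp [hp] at this

theorem convert_alt_getElem (arr : List Int) (n : Int) :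
    (convert_alt arr n).length = arr.length ∧
    ∀ j (hj : j < arr.length), (convert_alt arr n).getD j 0 = rankAt arr j := by
  rw [convert_alt_eq_ranksFrom]
  obtain ⟨hlen, hget⟩ := ranksFrom_getElem
    (fun v => (((PySem.List.enumerate (PySem.List.sorted arr (fun x => x)) 0).foldl
        (fun d p => if d.contains p.2 then d else d.insert p.2 p.1) PySem.Dict.empty).get? v).getD 0)
    PySem.Dict.empty arr
  refine ⟨hlen, ?_⟩
  intro j hj
  rw [hget j hj]
  have hmem : arr[j] ∈ arr := List.getElem_mem hj
  rw [first_get?, index?_sorted arr arr[j] hmem]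
  simp [rankAt, PySem.Dict.getD_empty, List.getElem?_eq_getElem hj]

-- ===== VERDICT (by name: the statement is the Claim_ definition above) =====
theorem convert_spec : Claim_equal_convert := by
  intro arr n _
  unfold Spec_convert
  obtain ⟨hl1, hg1⟩ := convert_getElem arr n
  obtain ⟨hl2, hg2⟩ := convert_alt_getElem arr n
  apply List.ext_getElem (by omega)
  intro j hj hj2
  have e1 := hg1 j (by omega)
  have e2 := hg2 j (by omega)
  rw [List.getD_eq_getElem _ _ hj] at e1
  rw [List.getD_eq_getElem _ _ hj2] at e2
  omega
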